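-- pv_equiv track=rewrite | github.com/hana904/Kriptografi | Praktik9/RSA_latih2.py | egcd_trace
-- ===== SOURCE A (Python) =====
-- def egcd_trace(a, b):
--     steps = []
--     A, B = a, b
--     while B != 0:
--         q = A // B
--         r = A % B
--         steps.append(f"{A} = {q} * {B} + {r}")
--         A, B = B, r
--     def egcd(a, b):
--         if b == 0:
--             return (a, 1, 0)
--         g, x1, y1 = egcd(b, a % b)
--         x = y1
--         y = x1 - (a // b) * y1
--         return (g, x, y)
--     g, x, y = egcd(a, b)
--     return steps, (g, x, y)
-- ===== SOURCE B (Python) =====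
-- def egcd_trace(a, b):
--     steps = []
--     old_r, r = a, b
--     old_s, s = 1, 0
--     old_t, t = 0, 1
--     while r != 0:
--         q, rem = divmod(old_r, r)
--         steps.append(f"{old_r} = {q} * {r} + {rem}")
--         old_r, r = r, rem
--         old_s, s = s, old_s - q * s
--         old_t, t = t, old_t - q * t
--     return steps, (old_r, old_s, old_t)
-- ===== Notes on version B (the rewrite author's own statement) =====
-- stated objective: simpler
-- what changed: Replaced A's two passes (a while-loop for the division trace plus a separate recursive extended-gcd) by one iterative extended-Euclid loop that carries remainders, Bezout coefficients and the trace together.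
import Mathlib
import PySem

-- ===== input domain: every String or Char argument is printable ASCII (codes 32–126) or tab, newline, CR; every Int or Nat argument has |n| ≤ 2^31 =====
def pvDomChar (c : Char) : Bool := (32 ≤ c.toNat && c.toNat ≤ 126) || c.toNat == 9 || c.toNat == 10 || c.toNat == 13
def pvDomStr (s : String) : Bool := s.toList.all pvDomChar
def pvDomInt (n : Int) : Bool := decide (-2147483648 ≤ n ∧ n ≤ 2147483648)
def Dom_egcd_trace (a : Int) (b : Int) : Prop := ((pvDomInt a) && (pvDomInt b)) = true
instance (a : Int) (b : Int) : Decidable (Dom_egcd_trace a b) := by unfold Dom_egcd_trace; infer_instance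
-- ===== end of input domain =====

-- B replaces A's two passes (trace loop + separate recursive egcd) by a single iterative
-- extended-Euclid pass carrying the Bézout coefficients alongside the trace (objective: simpler).


-- ===== PORT A =====
-- Python's % with a nonzero divisor shrinks |·|: used for termination of both ports.
theorem pymod_natAbs_lt (a b : Int) (h : b ≠ 0) : (PySem.Int.mod a b).natAbs < b.natAbs := by
  rcases lt_or_gt_of_ne h with hb | hb
  · obtain ⟨h1, h2⟩ := PySem.Int.mod_neg_bounds (a:=a) hb
    omega
  · have h1 := PySem.Int.mod_nonneg (a:=a) hb
    have h2 := PySem.Int.mod_lt (a:=a) hb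
    omega

-- the f-string f"{A} = {q} * {B} + {r}" (shared by both ports, verbatim in each Python)
def fmtStep (A q B r : Int) : String :=
  PySem.Int.toStr A ++ " = " ++ PySem.Int.toStr q ++ " * " ++ PySem.Int.toStr B ++ " + " ++ PySem.Int.toStr r

-- A's while-loop building `steps`
def egcdTraceLoopA (A B : Int) : List String :=
  if h : B = 0 then []
  else
    let q := PySem.Int.floordiv A B
    let r := PySem.Int.mod A B
    fmtStep A q B r :: egcdTraceLoopA B r
termination_by B.natAbs
decreasing_by exact pymod_natAbs_lt A B h

-- A's inner recursive egcd
def egcdRecA (a b : Int) : Int × Int × Int :=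
  if h : b = 0 then (a, 1, 0)
  else
    let p := egcdRecA b (PySem.Int.mod a b)   -- p = (g, x1, y1)
    (p.1, p.2.2, p.2.1 - (PySem.Int.floordiv a b) * p.2.2)
termination_by b.natAbs
decreasing_by exact pymod_natAbs_lt a b h

def egcd_trace (a : Int) (b : Int) : List String × (Int × Int × Int) :=
  (egcdTraceLoopA a b, egcdRecA a b)

-- ===== PORT B =====
-- B's single while-loop: trace and coefficients in one pass
def egcdLoopB (old_r r old_s s old_t t : Int) : List String × (Int × Int × Int) :=
  if h : r = 0 then ([], (old_r, old_s, old_t))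
  else
    let q := PySem.Int.floordiv old_r r
    let rem := PySem.Int.mod old_r r
    let rest := egcdLoopB r rem s (old_s - q * s) t (old_t - q * t)
    (fmtStep old_r q r rem :: rest.1, rest.2)
termination_by r.natAbs
decreasing_by exact pymod_natAbs_lt old_r r h

def egcd_trace_alt (a : Int) (b : Int) : List String × (Int × Int × Int) :=
  egcdLoopB a b 1 0 0 1

-- ===== PRECONDITION & SPEC =====
def Spec_egcd_trace (a : Int) (b : Int) (out : List String × (Int × Int × Int)) : Prop := out = egcd_trace_alt a b
instance (a : Int) (b : Int) (out : List String × (Int × Int × Int)) : Decidable (Spec_egcd_trace a b out) := by unfold Spec_egcd_trace; infer_instance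

-- ===== CLAIM (what is proved, stated in full; the proofs are below) =====
def Claim_equal_egcd_trace : Prop := ∀ (a : Int) (b : Int), Dom_egcd_trace a b → Spec_egcd_trace a b (egcd_trace a b)

-- ===== LEMMAS AND PROOFS =====
-- Loop invariant: B's iterative pass produces A's trace, and its coefficients are the
-- linear combination of A's recursive egcd result by the carried state.
theorem loopB_invariant : ∀ (n : Nat) (old_r r os s ot t : Int), r.natAbs = n →
    egcdLoopB old_r r os s ot t =
      (egcdTraceLoopA old_r r,
       ((egcdRecA old_r r).1,
        os * (egcdRecA old_r r).2.1 + s * (egcdRecA old_r r).2.2,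
        ot * (egcdRecA old_r r).2.1 + t * (egcdRecA old_r r).2.2)) := by
  intro n
  induction n using Nat.strong_induction_on with
  | _ n ih =>
    intro old_r r os s ot t hn
    by_cases h : r = 0
    · subst h
      rw [egcdLoopB, egcdTraceLoopA, egcdRecA]
      simp
    · rw [egcdLoopB, egcdTraceLoopA, egcdRecA]
      simp only [h, dif_neg, not_false_iff]
      have hlt : (PySem.Int.mod old_r r).natAbs < n := hn ▸ pymod_natAbs_lt old_r r h
      rw [ih _ hlt r (PySem.Int.mod old_r r) s (os - PySem.Int.floordiv old_r r * s)
            t (ot - PySem.Int.floordiv old_r r * t) rfl]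
      refine Prod.ext rfl (Prod.ext rfl (Prod.ext ?_ ?_)) <;> simp <;> ring

-- ===== VERDICT (by name: the statement is the Claim_ definition above) =====
theorem egcd_trace_spec : Claim_equal_egcd_trace := by
  intro a b _
  unfold Spec_egcd_trace egcd_trace egcd_trace_alt
  rw [loopB_invariant b.natAbs a b 1 0 0 1 rfl]
  simp
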